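-- pv_equiv track=rewrite | github.com/kunaljani1100/os-assignments | wordCountOperations.py | countWordsInPartition
-- ===== SOURCE A (Python) =====
-- def countWordsInPartition(words):
--
-- 	# Declare an empty dictionary that does not have any keys. In this dictionary, we have key-value pairs where the key is the word in the
-- 	# text file and the value is the number of occurences of the word.
-- 	dct = {}
--
-- 	# Parse through the partition list and count the occurences of each word, remove the punctuation marks from the words.
-- 	for word in words:
-- 		editedWord = ''
-- 		if word[-1] == '.' or word[-1] == ',' or word[-1] == '!' or word[-1] == '?':
-- 			editedWord = word[0:-1]
-- 		else:
-- 			editedWord = word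
--
-- 		# If the word is not in the dictionary keys, then initialize the value of the key to 1.
-- 		if editedWord not in dct.keys():
-- 			dct[editedWord] = 1
--
-- 		# Otherwise we increment the value of the key by 1.
-- 		else:
-- 			dct[editedWord] += 1
--
-- 	# Return the dictionary that keeps track of the number of occurences of each word.
-- 	return dct
-- ===== SOURCE B (Python) =====
-- def countWordsInPartition(words):
-- 	# Strip punctuation once up front, then peel off one distinct word per round:
-- 	# its count is how much the remaining list shrinks when it is filtered out.
-- 	edited = [w[:-1] if w[-1] in '.,!?' else w for w in words]
-- 	dct = {}
-- 	rest = edited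
-- 	while rest:
-- 		head = rest[0]
-- 		smaller = [w for w in rest if w != head]
-- 		dct[head] = len(rest) - len(smaller)
-- 		rest = smaller
-- 	return dct
-- ===== Notes on version B (the rewrite author's own statement) =====
-- stated objective: alternative
-- what changed: B replaces A's single-pass running dict counter with a repeated-extraction scheme: after one edit pass it repeatedly takes the first remaining word, obtains its count as the length difference when all its occurrences are filtered out of the remaining list, records it, and loops on the shrunk list; no per-element counter increments exist.
import Mathlib
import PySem

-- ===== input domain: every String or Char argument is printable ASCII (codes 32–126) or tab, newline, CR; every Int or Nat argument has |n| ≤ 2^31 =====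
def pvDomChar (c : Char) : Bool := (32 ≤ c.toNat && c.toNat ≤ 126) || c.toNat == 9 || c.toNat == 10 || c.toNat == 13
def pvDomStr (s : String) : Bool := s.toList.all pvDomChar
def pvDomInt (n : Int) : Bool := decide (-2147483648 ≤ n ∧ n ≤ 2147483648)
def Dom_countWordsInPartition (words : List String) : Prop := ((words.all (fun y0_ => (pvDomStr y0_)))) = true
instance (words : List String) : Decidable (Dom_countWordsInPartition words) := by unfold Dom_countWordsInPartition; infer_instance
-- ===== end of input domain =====

-- B strips punctuation in one pass, then repeatedly peels off the first remaining word, counting it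
-- by the length drop when filtered out, instead of A's running dict counter; objective: alternative (not faster).


-- ===== PORT A =====
-- word[0:-1] if word[-1] is '.', ',', '!' or '?' else word; 'none' = Python's IndexError on "" (excluded by Pre_), there we pass the word through
def pvEditA (word : String) : String :=
  match PySem.Str.pyGet? word (-1) with
  | some c =>
      if c = '.' ∨ c = ',' ∨ c = '!' ∨ c = '?' then PySem.Str.slice word (some 0) (some (-1)) else word
  | none => word

def countWordsInPartition (words : List String) : List (String × Int) :=
  (words.foldl (fun dct word =>
      let editedWord := pvEditA word
      if dct.contains editedWord = false then dct.insert editedWord 1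
      else dct.insert editedWord (dct.getD editedWord 0 + 1))
    (PySem.Dict.empty : PySem.Dict String Int)).items

-- ===== PORT B =====
-- word[:-1] if word[-1] in '.,!?' else word; the membership of a single char in '.,!?' is exact as list membership
def pvEditB (word : String) : String :=
  match PySem.Str.pyGet? word (-1) with
  | some c =>
      if c ∈ ".,!?".toList then PySem.Str.slice word none (some (-1)) else word
  | none => word

-- the while loop of Source B: take rest[0], filter out all its occurrences, record the length drop
def pvPeel (dct : PySem.Dict String Int) (rest : List String) : PySem.Dict String Int :=
  match rest with
  | [] => dct
  | head :: tail =>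
      let smaller := (head :: tail).filter (fun w => w != head)
      pvPeel (dct.insert head (((head :: tail).length : Int) - (smaller.length : Int))) smaller
termination_by rest.length
decreasing_by
  simp only [List.filter_cons, bne_self_eq_false, List.length_cons]
  exact Nat.lt_succ_of_le (List.length_filter_le _ _)

def countWordsInPartition_alt (words : List String) : List (String × Int) :=
  (pvPeel PySem.Dict.empty (words.map pvEditB)).items

-- ===== PRECONDITION & SPEC =====
-- Pre_ excludes lists containing the empty string, on which A raises IndexError at word[-1]
def Pre_countWordsInPartition (words : List String) : Prop := ∀ w ∈ words, w ≠ ""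
instance (words : List String) : Decidable (Pre_countWordsInPartition words) := by unfold Pre_countWordsInPartition; infer_instance
def pvWitness_countWordsInPartition : List String := ["hello", "world!", "hello", "!"]

def Spec_countWordsInPartition (words : List String) (out : List (String × Int)) : Prop := out = countWordsInPartition_alt words
instance (words : List String) (out : List (String × Int)) : Decidable (Spec_countWordsInPartition words out) := by unfold Spec_countWordsInPartition; infer_instance

-- ===== CLAIM (what is proved, stated in full; the proofs are below) =====
def Claim_equal_countWordsInPartition : Prop := ∀ (words : List String), Dom_countWordsInPartition words → Pre_countWordsInPartition words → Spec_countWordsInPartition words (countWordsInPartition words)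

-- ===== LEMMAS AND PROOFS =====

-- the two edit functions agree on every word
theorem pvEdit_eq : pvEditA = pvEditB := by
  funext word
  unfold pvEditA pvEditB
  cases h : PySem.Str.pyGet? word (-1) with
  | none => rfl
  | some c =>
      dsimp only
      have hc : (c = '.' ∨ c = ',' ∨ c = '!' ∨ c = '?') ↔ c ∈ ".,!?".toList := by
        rw [show ".,!?".toList = ['.', ',', '!', '?'] from rfl]
        simp only [List.mem_cons, List.not_mem_nil, or_false]
      have hs : PySem.Str.slice word (some 0) (some (-1)) = PySem.Str.slice word none (some (-1)) := rfl
      by_cases hd : c = '.' ∨ c = ',' ∨ c = '!' ∨ c = '?'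
      · rw [if_pos hd, if_pos (hc.mp hd), hs]
      · rw [if_neg hd, if_neg (fun hm => hd (hc.mpr hm))]

-- building the Python set of a filtered list filters the set
theorem pvOfList_filter (p : String → Bool) (l : List String) :
    PySem.Set.ofList (l.filter p) = (PySem.Set.ofList l).filter p := by
  induction l with
  | nil => rfl
  | cons x t ih =>
      rw [List.filter_cons]
      by_cases hx : p x = true
      · rw [if_pos hx, PySem.Set.ofList_cons, PySem.Set.ofList_cons]
        unfold PySem.Set.discard
        rw [List.filter_cons, if_pos hx, ih, List.filter_filter, List.filter_filter]
        exact congrArg _ (List.filter_congr (fun y _ => by rw [Bool.and_comm]))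
      · rw [if_neg hx, ih, PySem.Set.ofList_cons]
        unfold PySem.Set.discard
        rw [List.filter_cons, if_neg hx, List.filter_filter]
        refine (List.filter_congr (fun y _ => ?_)).symm
        by_cases hy : p y = true
        · have hne : (y == x) = false := by
            refine beq_eq_false_iff_ne.mpr (fun he => ?_)
            rw [he] at hy; exact hx hy
          simp [hy, hne]
        · simp [Bool.eq_false_iff.mpr hy]

-- B's peel loop appends exactly the first-occurrence-ordered counts of the remaining list
theorem pvPeel_items : ∀ (n : Nat) (rest : List String) (d : PySem.Dict String Int),
    rest.length ≤ n → (∀ k ∈ rest, d.contains k = false) →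
    (pvPeel d rest).items
      = d.items ++ (PySem.Set.ofList rest).map (fun k => (k, (rest.count k : Int))) := by
  intro n
  induction n with
  | zero =>
      intro rest d hlen _
      have : rest = [] := List.eq_nil_of_length_eq_zero (Nat.le_zero.mp hlen)
      subst this
      simp [pvPeel, PySem.Set.ofList]
  | succ n ih =>
      intro rest d hlen hfresh
      match rest with
      | [] => simp [pvPeel, PySem.Set.ofList]
      | head :: tail =>
          have hsm : (head :: tail).filter (fun w => w != head) = tail.filter (fun w => w != head) := by
            rw [List.filter_cons]; simp
          rw [pvPeel]
          simp only [hsm]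
          -- the recorded value is the count of head
          have hcount : ((head :: tail).length : Int) - ((tail.filter (fun w => w != head)).length : Int)
              = (((head :: tail).count head : Nat) : Int) := by
            have hsplit : (head :: tail).length
                = ((head :: tail).filter (fun w => w == head)).length
                  + (tail.filter (fun w => w != head)).length := by
              rw [← hsm]
              have := List.length_eq_length_filter_add (l := head :: tail) (fun w => w == head)
              simpa [bne] using this
            have hcnt : (head :: tail).count head
                = ((head :: tail).filter (fun w => w == head)).length := by
              rw [List.count, List.countP_eq_length_filter]
            omega
          -- the new dict key is fresh
          have hfresh0 : d.contains head = false := hfresh head (List.mem_cons_self)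
          -- apply the IH to the smaller list
          have hlen' : (tail.filter (fun w => w != head)).length ≤ n :=
            Nat.le_trans (List.length_filter_le _ _) (Nat.le_of_succ_le_succ hlen)
          have hfresh' : ∀ k ∈ tail.filter (fun w => w != head),
              (d.insert head (((head :: tail).length : Int)
                - ((tail.filter (fun w => w != head)).length : Int))).contains k = false := by
            intro k hk
            obtain ⟨hkt, hkne⟩ := List.mem_filter.mp hk
            rw [PySem.Dict.contains_insert]
            have h1 : (k == head) = false := by simpa [bne] using hkne
            rw [h1, hfresh k (List.mem_cons_of_mem _ hkt)]
            rfl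
          rw [ih _ _ hlen' hfresh',
            PySem.Dict.items_insert_of_not_contains d _ hfresh0]
          -- assemble the right-hand side
          rw [PySem.Set.ofList_cons]
          have hset : PySem.Set.ofList (tail.filter (fun w => w != head))
              = PySem.Set.discard (PySem.Set.ofList tail) head := by
            rw [pvOfList_filter]
            unfold PySem.Set.discard
            exact List.filter_congr (fun y _ => by simp [bne])
          have hcounts : (PySem.Set.ofList (tail.filter (fun w => w != head))).map
                (fun k => (k, ((tail.filter (fun w => w != head)).count k : Int)))
              = (PySem.Set.discard (PySem.Set.ofList tail) head).map
                  (fun k => (k, ((head :: tail).count k : Int))) := by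
            rw [hset]
            apply List.map_congr_left
            intro k hk
            have hkne : k ≠ head := ((PySem.Set.mem_discard _ _ _).mp hk).2
            have h1 : (tail.filter (fun w => w != head)).count k = tail.count k :=
              List.count_filter (by simpa [bne] using hkne)
            have h2 : (head :: tail).count k = tail.count k :=
              List.count_cons_of_ne (fun h => hkne h.symm)
            rw [h1, h2]
          rw [hcounts, hcount]
          simp [List.append_assoc]

-- ===== VERDICT (by name: the statement is the Claim_ definition above) =====
theorem countWordsInPartition_spec : Claim_equal_countWordsInPartition := by
  intro words _ _
  unfold Spec_countWordsInPartition countWordsInPartition countWordsInPartition_alt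
  rw [pvEdit_eq]
  set E := words.map pvEditB with hE
  -- A's loop over words, editing inside, is a loop over E
  have hA : words.foldl (fun dct word =>
        let editedWord := pvEditB word
        if dct.contains editedWord = false then dct.insert editedWord 1
        else dct.insert editedWord (dct.getD editedWord 0 + 1))
      (PySem.Dict.empty : PySem.Dict String Int)
      = E.foldl (fun dct e =>
        if dct.contains e = false then dct.insert e 1
        else dct.insert e (dct.getD e 0 + 1)) PySem.Dict.empty := by
    rw [hE, List.foldl_map]
  rw [hA]
  -- A's step is the counter step
  have hstep : E.foldl (fun dct e =>
        if dct.contains e = false then dct.insert e 1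
        else dct.insert e (dct.getD e 0 + 1)) (PySem.Dict.empty : PySem.Dict String Int)
      = E.foldl (fun dct e => dct.insert e (dct.getD e 0 + 1)) PySem.Dict.empty := by
    apply PySem.List.foldl_congr_mem
    intro dct e _
    by_cases hc : dct.contains e = false
    · rw [if_pos hc, PySem.Dict.getD_of_not_contains dct 0 hc, zero_add]
    · rw [if_neg hc]
  rw [hstep, PySem.Dict.foldl_insert_getD_add_one_eq_counter, PySem.Dict.items_counter]
  -- B's peel loop from the empty dict
  rw [pvPeel_items E.length E PySem.Dict.empty (Nat.le_refl _)
    (fun k _ => PySem.Dict.contains_empty k)]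
  rfl
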